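-- pv_equiv track=rewrite | github.com/just-yagodkin/public_demos | goodfunctions.py | structure_error
-- ===== SOURCE A (Python) =====
-- def revstring(string: str):
--     temp = "%s" % string
--     return temp[::-1]
--
-- def structure_error(user: list, dgp: list):
--     count = 0
--
--     for str in user:
--         if str not in dgp:
--             if revstring(str) not in dgp:  # user set an edge which is not in original data
--                 count += 1
--
--     for str in dgp:
--         if str not in user:
--             if revstring(str) not in user:  # user missed an edge
--                 count += 1
--
--     return count
-- ===== SOURCE B (Python) =====
-- def structure_error(user: list, dgp: list):
--     # Canonicalize each edge to the lexicographically smaller of the string and its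
--     # reversal; an edge s is "present" in a list exactly when some element of the
--     # list has the same canonical form. Count multiset symmetric difference of
--     # canonical keys via two counters.
--     def canon(s):
--         r = s[::-1]
--         return r if r < s else s
--     cu = {}
--     for s in user:
--         k = canon(s)
--         cu[k] = cu.get(k, 0) + 1
--     cd = {}
--     for s in dgp:
--         k = canon(s)
--         cd[k] = cd.get(k, 0) + 1
--     return sum(v for k, v in cu.items() if k not in cd) + sum(v for k, v in cd.items() if k not in cu)
-- ===== Notes on version B (the rewrite author's own statement) =====
-- stated objective: faster
-- what changed: Instead of A's nested membership scans with a per-element reversal test, B canonicalizes every edge to min(s, s[::-1]) once, builds a counter of canonical keys per list, and returns the size of the multiset symmetric difference of the two key sets.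
import Mathlib
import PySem

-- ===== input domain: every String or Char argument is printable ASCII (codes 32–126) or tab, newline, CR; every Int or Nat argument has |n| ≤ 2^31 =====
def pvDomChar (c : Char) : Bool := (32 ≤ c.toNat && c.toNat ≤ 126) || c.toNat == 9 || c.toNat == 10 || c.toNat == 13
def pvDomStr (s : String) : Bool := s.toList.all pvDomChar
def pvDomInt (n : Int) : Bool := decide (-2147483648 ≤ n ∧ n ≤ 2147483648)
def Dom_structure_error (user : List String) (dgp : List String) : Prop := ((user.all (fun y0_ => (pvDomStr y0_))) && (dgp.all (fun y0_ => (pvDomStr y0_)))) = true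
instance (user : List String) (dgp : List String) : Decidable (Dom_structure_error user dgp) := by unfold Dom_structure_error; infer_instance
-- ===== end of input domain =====

-- B replaces A's nested list scans by canonicalizing each edge (min of string and its reversal)
-- and counting the multiset symmetric difference of canonical keys via two counters.


-- ===== PORT A =====
-- revstring: temp = "%s" % string (= string); return temp[::-1]
def revstring (string : String) : String :=
  let temp := string
  (PySem.Str.slice? temp none none (-1)).getD ""

def structure_error (user : List String) (dgp : List String) : Int :=
  let count : Int := 0
  let count := user.foldl (fun count str =>
    if str ∉ dgp then
      if revstring str ∉ dgp then count + 1 else count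
    else count) count
  let count := dgp.foldl (fun count str =>
    if str ∉ user then
      if revstring str ∉ user then count + 1 else count
    else count) count
  count

-- ===== PORT B =====
-- canon(s): r = s[::-1]; return r if r < s else s
def canonB (s : String) : String :=
  let r := (PySem.Str.slice? s none none (-1)).getD ""
  if r < s then r else s

def structure_error_alt (user : List String) (dgp : List String) : Int :=
  let cu := user.foldl (fun d s => let k := canonB s; d.insert k (d.getD k 0 + 1))
    (PySem.Dict.empty : PySem.Dict String Int)
  let cd := dgp.foldl (fun d s => let k := canonB s; d.insert k (d.getD k 0 + 1))
    (PySem.Dict.empty : PySem.Dict String Int)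
  (cu.items.foldl (fun a kv => if !(cd.contains kv.1) then a + kv.2 else a) (0 : Int))
    + (cd.items.foldl (fun a kv => if !(cu.contains kv.1) then a + kv.2 else a) (0 : Int))

-- ===== PRECONDITION & SPEC =====
def Spec_structure_error (user : List String) (dgp : List String) (out : Int) : Prop := out = structure_error_alt user dgp
instance (user : List String) (dgp : List String) (out : Int) : Decidable (Spec_structure_error user dgp out) := by unfold Spec_structure_error; infer_instance

-- ===== CLAIM (what is proved, stated in full; the proofs are below) =====
def Claim_equal_structure_error : Prop := ∀ (user : List String) (dgp : List String), Dom_structure_error user dgp → Spec_structure_error user dgp (structure_error user dgp)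

-- ===== LEMMAS AND PROOFS =====

theorem rev_eq (s : String) : revstring s = String.ofList s.toList.reverse := by
  simp [revstring, PySem.Str.slice?_none_none_neg_one]

theorem rev_rev (s : String) : revstring (revstring s) = s := by
  simp [rev_eq]

theorem canonB_eq (s : String) : canonB s = if revstring s < s then revstring s else s := rfl

theorem canonB_cases (s : String) : canonB s = s ∨ canonB s = revstring s := by
  rw [canonB_eq]
  split_ifs with h
  · exact Or.inr rfl
  · exact Or.inl rfl

theorem canonB_rev (s : String) : canonB (revstring s) = canonB s := by
  rw [canonB_eq, canonB_eq, rev_rev]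
  rcases lt_trichotomy (revstring s) s with h | h | h
  · rw [if_neg (asymm h), if_pos h]
  · rw [h]
  · rw [if_pos h, if_neg (asymm h)]

theorem canonB_eq_imp (s t : String) (h : canonB t = canonB s) :
    t = s ∨ t = revstring s := by
  rcases canonB_cases t with ht | ht <;> rcases canonB_cases s with hs | hs
  · left; rw [← ht, ← hs, h]
  · right; rw [← ht, ← hs, h]
  · -- revstring t = canon t = canon s = s
    have hts : revstring t = s := by rw [← ht, h]; exact hs
    right; rw [← hts, rev_rev]
  · have hts : revstring t = revstring s := by rw [← ht, h]; exact hs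
    have h2 := congrArg revstring hts
    rw [rev_rev, rev_rev] at h2
    left; exact h2

theorem canon_mem_map (s : String) (l : List String) :
    canonB s ∈ l.map canonB ↔ s ∈ l ∨ revstring s ∈ l := by
  constructor
  · intro h
    rcases List.mem_map.mp h with ⟨t, htl, h⟩
    rcases canonB_eq_imp s t h with h | h
    · exact Or.inl (h ▸ htl)
    · exact Or.inr (h ▸ htl)
  · rintro (h | h)
    · exact List.mem_map.mpr ⟨s, h, rfl⟩
    · exact List.mem_map.mpr ⟨revstring s, h, canonB_rev s⟩

-- A's per-list loop counts elements whose canonical form is absent from the other list's canonical forms.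
theorem sideA (l other : List String) (c : Int) :
    l.foldl (fun count str =>
      if str ∉ other then
        if revstring str ∉ other then count + 1 else count
      else count) c
    = c + (l.countP (fun s => !(other.map canonB).contains (canonB s)) : Int) := by
  have h1 : (fun (count : Int) (str : String) =>
      if str ∉ other then
        if revstring str ∉ other then count + 1 else count
      else count)
      = (fun (count : Int) (str : String) =>
        if (str ∉ other ∧ revstring str ∉ other) then count + 1 else count) := by
    funext count str
    by_cases hs : str ∈ other
    · rw [if_neg (not_not_intro hs), if_neg (fun hc => hc.1 hs)]
    · by_cases hr : revstring str ∈ other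
      · rw [if_pos hs, if_neg (not_not_intro hr), if_neg (fun hc => hc.2 hr)]
      · rw [if_pos hs, if_pos hr, if_pos ⟨hs, hr⟩]
  rw [h1, PySem.List.foldl_ite_add_one]
  congr 1
  norm_cast
  apply List.countP_congr
  intro s _
  have hc : ((other.map canonB).contains (canonB s)) = decide (s ∈ other ∨ revstring s ∈ other) := by
    simp [canon_mem_map]
  rw [hc]
  simp

-- Σ over a nodup key list of (if P k then ys.count k else 0) = countP of (P ∘ identity) over ys,
-- provided every element of ys occurs among the keys.
theorem sum_one_of_mem (ks : List String) (P : String → Bool) (y : String)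
    (hnd : ks.Nodup) (hy : y ∈ ks) :
    (ks.map (fun k => if P k ∧ y = k then (1 : Int) else 0)).sum = if P y then 1 else 0 := by
  induction ks with
  | nil => exact absurd hy (List.not_mem_nil)
  | cons k ks ihk =>
    rcases List.mem_cons.mp hy with rfl | hmem
    · have hnotin : y ∉ ks := (List.nodup_cons.mp hnd).1
      have hzero : (ks.map (fun k => if P k ∧ y = k then (1 : Int) else 0)).sum = 0 := by
        have hmap : (ks.map (fun k => if P k ∧ y = k then (1 : Int) else 0)) = ks.map (fun _ => (0:Int)) := by
          apply List.map_congr_left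
          intro k hk
          rw [if_neg]
          rintro ⟨-, rfl⟩
          exact hnotin hk
        rw [hmap]; simp
      by_cases hp : P y <;> simp [hp, hzero]
    · have hne : ¬ (y = k) := by
        rintro rfl
        exact (List.nodup_cons.mp hnd).1 hmem
      have hrec := ihk (List.nodup_cons.mp hnd).2 hmem
      simp only [List.map_cons, List.sum_cons, hrec]
      rw [if_neg (by rintro ⟨-, h⟩; exact hne h)]
      ring

theorem sum_ite_count (ks : List String) (P : String → Bool) (ys : List String)
    (hnd : ks.Nodup) (hsub : ∀ y ∈ ys, y ∈ ks) :
    (ks.map (fun k => if P k then (ys.count k : Int) else 0)).sum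
      = (ys.countP P : Int) := by
  induction ys with
  | nil => simp
  | cons y ys ih =>
    have hy : y ∈ ks := hsub y (List.mem_cons_self)
    have hsub' : ∀ z ∈ ys, z ∈ ks := fun z hz => hsub z (List.mem_cons_of_mem _ hz)
    have hsplit : (ks.map (fun k => if P k then ((y :: ys).count k : Int) else 0))
        = ks.map (fun k => (if P k then (ys.count k : Int) else 0)
            + (if P k ∧ y = k then 1 else 0)) := by
      apply List.map_congr_left
      intro k _
      rw [List.count_cons]
      by_cases hp : P k
      · by_cases he : y = k
        · simp [hp, he]
        · have hb : (y == k) = false := beq_false_of_ne he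
          simp [hp, he, hb]
      · simp [hp]
    rw [hsplit, List.sum_map_add, ih hsub', sum_one_of_mem ks P y hnd hy, List.countP_cons]
    by_cases hp : P y <;> simp [hp]

-- B's per-counter loop sums the multiplicities of the qualifying keys.
theorem sideB (l other : List String) :
    ((PySem.Dict.counter (l.map canonB)).items.foldl
        (fun a kv => if !((PySem.Dict.counter (other.map canonB)).contains kv.1) then a + kv.2 else a) (0 : Int))
      = ((l.map canonB).countP (fun k => !(other.map canonB).contains k) : Int) := by
  rw [PySem.Dict.items_counter, List.foldl_map]
  have hstep : (fun (a : Int) (k : String) =>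
      if !((PySem.Dict.counter (other.map canonB)).contains k) then a + ((l.map canonB).count k : Int) else a)
      = (fun (a : Int) (k : String) =>
        a + (if !((other.map canonB).contains k) then ((l.map canonB).count k : Int) else 0)) := by
    funext a k
    rw [PySem.Dict.contains_counter]
    split_ifs <;> simp
  rw [hstep, PySem.List.foldl_add, sum_ite_count]
  · simp
  · exact PySem.Set.nodup_ofList _
  · intro y hy
    exact (PySem.Set.mem_ofList _ _).mpr hy

-- ===== VERDICT (by name: the statement is the Claim_ definition above) =====
theorem structure_error_spec : Claim_equal_structure_error := by
  intro user dgp _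
  unfold Spec_structure_error structure_error structure_error_alt
  have hu : user.foldl (fun d s => d.insert (canonB s) (d.getD (canonB s) 0 + 1))
      (PySem.Dict.empty : PySem.Dict String Int) = PySem.Dict.counter (user.map canonB) := by
    rw [← PySem.Dict.foldl_insert_getD_add_one_eq_counter, List.foldl_map]
  have hd : dgp.foldl (fun d s => d.insert (canonB s) (d.getD (canonB s) 0 + 1))
      (PySem.Dict.empty : PySem.Dict String Int) = PySem.Dict.counter (dgp.map canonB) := by
    rw [← PySem.Dict.foldl_insert_getD_add_one_eq_counter, List.foldl_map]
  simp only [hu, hd, sideB user dgp, sideB dgp user, sideA user dgp, sideA dgp user,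
    List.countP_map, Function.comp_def, zero_add]
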